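-- pv_equiv track=rewrite | github.com/nafisanawal04/FootballAnalysisProject-RnD | FootballAnalysis/pass_and_interception_detector/pass_and_interception_detector.py | detect_passes
-- ===== SOURCE A (Python) =====
-- def detect_passes(ball_acquisition, player_assignment):
--     """
--     Detects successful passes between players of the same team.
--     Improved to handle frames where ball is in the air (no holder = -1).
--     """
--     passes = [-1] * len(ball_acquisition)
--
--     prev_holder = -1
--     prev_holder_frame = -1
--
--     for frame in range(len(ball_acquisition)):
--         current_holder = ball_acquisition[frame]
--
--         # Update previous holder when someone has the ball
--         if current_holder != -1:
--             # Check if ball changed hands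
--             if prev_holder != -1 and prev_holder != current_holder:
--                 # Get teams (check within reasonable frame window)
--                 if prev_holder_frame < len(player_assignment) and frame < len(player_assignment):
--                     prev_team = player_assignment[prev_holder_frame].get(prev_holder, -1)
--                     current_team = player_assignment[frame].get(current_holder, -1)
--
--                     # Same team = successful pass
--                     if prev_team == current_team and prev_team != -1:
--                         passes[frame] = prev_team
--
--             # Update tracking
--             prev_holder = current_holder
--             prev_holder_frame = frame
--
--     return passes
-- ===== SOURCE B (Python) =====
-- def detect_passes(ball_acquisition, player_assignment):
--     n = len(ball_acquisition)
--     events = [(f, h) for f, h in enumerate(ball_acquisition) if h != -1]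
--     # run-length compress consecutive equal holders: (first_frame, last_frame, holder)
--     runs = []
--     for f, h in events:
--         if runs and runs[-1][2] == h:
--             runs[-1] = (runs[-1][0], f, h)
--         else:
--             runs.append((f, f, h))
--     # each boundary between two runs is a change of hands; record same-team passes
--     hits = {}
--     for (_, pf, ph), (cf, _, ch) in zip(runs, runs[1:]):
--         if pf < len(player_assignment) and cf < len(player_assignment):
--             prev_team = player_assignment[pf].get(ph, -1)
--             current_team = player_assignment[cf].get(ch, -1)
--             if prev_team == current_team and prev_team != -1:
--                 hits[cf] = prev_team
--     return [hits.get(i, -1) for i in range(n)]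
-- ===== Notes on version B (the rewrite author's own statement) =====
-- stated objective: alternative
-- what changed: Replaces A's per-frame prev_holder state machine by a staged pipeline: run-length compress the non-(-1) holder sequence into (first,last,holder) runs (so the holder-change test disappears: every run boundary is a change), record same-team boundaries in a dict keyed by frame, and render the output list by dict lookup over range(n) instead of in-place assignment.
import Mathlib
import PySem

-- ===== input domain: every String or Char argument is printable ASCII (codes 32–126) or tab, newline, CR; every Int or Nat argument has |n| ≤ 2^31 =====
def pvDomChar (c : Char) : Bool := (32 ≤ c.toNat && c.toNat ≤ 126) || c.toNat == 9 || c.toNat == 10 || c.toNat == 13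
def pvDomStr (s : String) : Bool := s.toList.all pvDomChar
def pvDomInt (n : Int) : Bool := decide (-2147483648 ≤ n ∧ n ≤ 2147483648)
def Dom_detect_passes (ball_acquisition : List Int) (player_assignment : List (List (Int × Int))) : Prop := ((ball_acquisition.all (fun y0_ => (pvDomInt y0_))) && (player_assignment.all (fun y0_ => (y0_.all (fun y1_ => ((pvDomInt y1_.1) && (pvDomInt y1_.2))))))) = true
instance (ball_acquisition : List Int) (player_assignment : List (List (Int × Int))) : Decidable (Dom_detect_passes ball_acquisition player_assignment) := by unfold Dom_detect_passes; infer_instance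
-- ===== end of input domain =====

-- B replaces A's per-frame prev_holder state machine by a staged pipeline: events →
-- run-length compression into (first, last, holder) runs → a dict of pass frames at
-- run boundaries → output rendered by dict lookup; objective: alternative decomposition.

-- ===== PORT A =====
-- A's for-loop over range(len(ball_acquisition)) as structural recursion over the list,
-- carrying the frame counter and the state (passes, prev_holder, prev_holder_frame).
-- player_assignment[i] is always accessed with 0 ≤ i < length (guarded in A), so getD is exact.
def detect_passes_loop (pa : List (List (Int × Int))) :
    List Int → Nat → List Int → Int → Int → List Int
  | [], _, passes, _, _ => passes
  | ch :: rest, frame, passes, ph, phf =>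
    if ch ≠ -1 then
      let passes' :=
        if ph ≠ -1 ∧ ph ≠ ch then
          if phf < (pa.length : Int) ∧ (frame : Int) < (pa.length : Int) then
            let prev_team := PySem.Dict.getD ⟨pa.getD phf.toNat []⟩ ph (-1)
            let current_team := PySem.Dict.getD ⟨pa.getD frame []⟩ ch (-1)
            if prev_team = current_team ∧ prev_team ≠ -1 then
              passes.set frame prev_team
            else passes
          else passes
        else passes
      detect_passes_loop pa rest (frame + 1) passes' ch (frame : Int)
    else
      detect_passes_loop pa rest (frame + 1) passes ph phf

def detect_passes (ball_acquisition : List Int) (player_assignment : List (List (Int × Int))) : List Int :=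
  detect_passes_loop player_assignment ball_acquisition 0
    (List.replicate ball_acquisition.length (-1)) (-1) (-1)

-- ===== PORT B =====
-- the comprehension [(f, h) for f, h in enumerate(ba) if h != -1]
def detect_passes_events : Int → List Int → List (Int × Int)
  | _, [] => []
  | f, h :: rest =>
    if h ≠ -1 then (f, h) :: detect_passes_events (f + 1) rest
    else detect_passes_events (f + 1) rest

-- one iteration of B's run-compression loop: mutate runs[-1] or append a fresh run
def detect_passes_runStep (rs : List (Int × Int × Int)) (e : Int × Int) :
    List (Int × Int × Int) :=
  match rs.getLast? with
  | some (a, _, hl) =>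
    if hl = e.2 then rs.dropLast ++ [(a, e.1, e.2)] else rs ++ [(e.1, e.1, e.2)]
  | none => [(e.1, e.1, e.2)]

-- the body of B's loop over one consecutive run pair: record the pass frame in hits
def detect_passes_hitStep (pa : List (List (Int × Int)))
    (hits : PySem.Dict Int Int) (pr : (Int × Int × Int) × (Int × Int × Int)) :
    PySem.Dict Int Int :=
  let ((_, pf, ph), (cf, _, ch)) := pr
  if pf < (pa.length : Int) ∧ cf < (pa.length : Int) then
    let prev_team := PySem.Dict.getD ⟨pa.getD pf.toNat []⟩ ph (-1)
    let current_team := PySem.Dict.getD ⟨pa.getD cf.toNat []⟩ ch (-1)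
    if prev_team = current_team ∧ prev_team ≠ -1 then hits.insert cf prev_team
    else hits
  else hits

def detect_passes_alt (ball_acquisition : List Int) (player_assignment : List (List (Int × Int))) : List Int :=
  let events := detect_passes_events 0 ball_acquisition
  let runs := events.foldl detect_passes_runStep []
  let hits := (runs.zip runs.tail).foldl (detect_passes_hitStep player_assignment)
    (PySem.Dict.mk [])
  (List.range ball_acquisition.length).map (fun i : Nat => hits.getD (i : Int) (-1))

-- ===== PRECONDITION & SPEC =====
def Spec_detect_passes (ball_acquisition : List Int) (player_assignment : List (List (Int × Int))) (out : List Int) : Prop := out = detect_passes_alt ball_acquisition player_assignment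
instance (ball_acquisition : List Int) (player_assignment : List (List (Int × Int))) (out : List Int) : Decidable (Spec_detect_passes ball_acquisition player_assignment out) := by unfold Spec_detect_passes; infer_instance

-- ===== CLAIM (what is proved, stated in full; the proofs are below) =====
def Claim_equal_detect_passes : Prop := ∀ (ball_acquisition : List Int) (player_assignment : List (List (Int × Int))), Dom_detect_passes ball_acquisition player_assignment → Spec_detect_passes ball_acquisition player_assignment (detect_passes ball_acquisition player_assignment)

-- ===== LEMMAS AND PROOFS =====

-- A's pair step (proof-side view of A's update at a holder change)
def pvPairStep (pa : List (List (Int × Int))) (passes : List Int)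
    (pr : (Int × Int) × (Int × Int)) : List Int :=
  let ((pf, ph), (cf, ch)) := pr
  if ph ≠ ch ∧ pf < (pa.length : Int) ∧ cf < (pa.length : Int) then
    let prev_team := PySem.Dict.getD ⟨pa.getD pf.toNat []⟩ ph (-1)
    let current_team := PySem.Dict.getD ⟨pa.getD cf.toNat []⟩ ch (-1)
    if prev_team = current_team ∧ prev_team ≠ -1 then passes.set cf.toNat prev_team
    else passes
  else passes

-- proof-side run-pair step that writes into the passes list instead of a dict
def pvSetStep (pa : List (List (Int × Int))) (passes : List Int)
    (pr : (Int × Int × Int) × (Int × Int × Int)) : List Int :=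
  let ((_, pf, ph), (cf, _, ch)) := pr
  if pf < (pa.length : Int) ∧ cf < (pa.length : Int) then
    let prev_team := PySem.Dict.getD ⟨pa.getD pf.toNat []⟩ ph (-1)
    let current_team := PySem.Dict.getD ⟨pa.getD cf.toNat []⟩ ch (-1)
    if prev_team = current_team ∧ prev_team ≠ -1 then passes.set cf.toNat prev_team
    else passes
  else passes

-- proof-side run builder: pending run (a,b,h), remaining events
def pvRunsCont : Int × Int × Int → List (Int × Int) → List (Int × Int × Int)
  | cur, [] => [cur]
  | (a, b, h), (f, h') :: rest =>
    if h' = h then pvRunsCont (a, f, h) rest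
    else (a, b, h) :: pvRunsCont (f, f, h') rest

lemma detect_passes_step_eq (pa : List (List (Int × Int))) (passes : List Int)
    (ph phf ch : Int) (frame : Nat) (hph : ph ≠ -1) :
    (if ph ≠ -1 ∧ ph ≠ ch then
       if phf < (pa.length : Int) ∧ (frame : Int) < (pa.length : Int) then
         let prev_team := PySem.Dict.getD ⟨pa.getD phf.toNat []⟩ ph (-1)
         let current_team := PySem.Dict.getD ⟨pa.getD frame []⟩ ch (-1)
         if prev_team = current_team ∧ prev_team ≠ -1 then
           passes.set frame prev_team
         else passes
       else passes
     else passes) =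
      pvPairStep pa passes ((phf, ph), ((frame : Int), ch)) := by
  simp only [pvPairStep, Int.toNat_natCast]
  by_cases h1 : ph = ch <;> by_cases h2 : phf < (pa.length : Int) <;>
    by_cases h3 : (frame : Int) < (pa.length : Int) <;>
    simp [hph, h1, h2, h3]

-- A's loop equals the pair fold over the events of the remaining frames, where A's
-- (prev_holder, prev_holder_frame) state contributes a leading event iff prev_holder ≠ -1.
lemma detect_passes_loop_eq (pa : List (List (Int × Int))) :
    ∀ (ba : List Int) (frame : Nat) (passes : List Int) (ph phf : Int),
      detect_passes_loop pa ba frame passes ph phf =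
        (let evs := (if ph = -1 then [] else [(phf, ph)]) ++
            detect_passes_events (frame : Int) ba
         (evs.zip evs.tail).foldl (pvPairStep pa) passes) := by
  intro ba
  induction ba with
  | nil =>
    intro frame passes ph phf
    simp only [detect_passes_loop, detect_passes_events, List.append_nil]
    split <;> simp
  | cons ch rest ih =>
    intro frame passes ph phf
    have hcast : ((frame : Int) + 1) = ((frame + 1 : Nat) : Int) := by push_cast; ring
    by_cases hch : ch = -1
    · simp only [detect_passes_loop, detect_passes_events, hch, ne_eq, not_true_eq_false,
        if_false, ih, hcast]
    · by_cases hph : ph = -1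
      · simp only [detect_passes_loop, detect_passes_events, hch, ne_eq,
          not_false_eq_true, if_true, hph, not_true_eq_false, false_and, if_false,
          ih, hcast]
        simp
      · have hch' : ch ≠ -1 := hch
        simp only [detect_passes_loop]
        rw [if_pos hch', detect_passes_step_eq pa passes ph phf ch frame hph, ih]
        simp only [detect_passes_events, hch, ne_eq, not_false_eq_true, if_true, hph,
          if_false, hcast, List.singleton_append, List.tail_cons,
          List.zip_cons_cons, List.foldl_cons]

-- pvRunsCont keeps the pending run's first frame and holder at the head
lemma pvRunsCont_head (cur : Int × Int × Int) (evs : List (Int × Int)) :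
    ∃ x rest, pvRunsCont cur evs = (cur.1, x, cur.2.2) :: rest := by
  induction evs generalizing cur with
  | nil => exact ⟨cur.2.1, [], by obtain ⟨a, b, h⟩ := cur; rfl⟩
  | cons e rest ih =>
    obtain ⟨a, b, h⟩ := cur
    obtain ⟨f, h'⟩ := e
    by_cases hh : h' = h
    · obtain ⟨x, r, hr⟩ := ih (a, f, h)
      exact ⟨x, r, by simpa [pvRunsCont, hh] using hr⟩
    · exact ⟨b, pvRunsCont (f, f, h') rest, by simp [pvRunsCont, hh]⟩

-- the event-pair fold equals the run-pair fold (with pvSetStep) over pvRunsCont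
lemma pairFold_eq_runFold (pa : List (List (Int × Int))) :
    ∀ (evs : List (Int × Int)) (a b h : Int) (passes : List Int),
      (((b, h) :: evs).zip evs).foldl (pvPairStep pa) passes =
        ((pvRunsCont (a, b, h) evs).zip (pvRunsCont (a, b, h) evs).tail).foldl
          (pvSetStep pa) passes := by
  intro evs
  induction evs with
  | nil => intro a b h passes; simp [pvRunsCont]
  | cons e rest ih =>
    intro a b h passes
    obtain ⟨f, h'⟩ := e
    by_cases hh : h' = h
    · subst hh
      have hid : pvPairStep pa passes ((b, h'), (f, h')) = passes := by
        simp [pvPairStep]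
      simpa [pvRunsCont, List.zip_cons_cons, hid] using ih a f h' passes
    · obtain ⟨x, r, hr⟩ := pvRunsCont_head (f, f, h') rest
      have hstep : pvSetStep pa passes ((a, b, h), (f, x, h')) =
          pvPairStep pa passes ((b, h), (f, h')) := by
        have hne : h ≠ h' := fun hc => hh hc.symm
        by_cases h2 : b < (pa.length : Int) <;> by_cases h3 : f < (pa.length : Int) <;>
          simp [pvSetStep, pvPairStep, hne, h2, h3]
      simpa [pvRunsCont, hh, hr, List.zip_cons_cons, hstep]
        using ih f f h' (pvPairStep pa passes ((b, h), (f, h')))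

-- A as the event-pair fold
lemma detect_passes_eq_pairFold (ba : List Int) (pa : List (List (Int × Int))) :
    detect_passes ba pa =
      ((detect_passes_events 0 ba).zip (detect_passes_events 0 ba).tail).foldl
        (pvPairStep pa) (List.replicate ba.length (-1)) := by
  unfold detect_passes
  rw [detect_passes_loop_eq]
  simp

-- B's run-compression fold computes pvRunsCont
lemma foldl_runStep_eq (evs : List (Int × Int)) (rs : List (Int × Int × Int))
    (cur : Int × Int × Int) :
    evs.foldl detect_passes_runStep (rs ++ [cur]) = rs ++ pvRunsCont cur evs := by
  induction evs generalizing rs cur with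
  | nil => simp [pvRunsCont]
  | cons e rest ih =>
    obtain ⟨a, b, h⟩ := cur
    obtain ⟨f, h'⟩ := e
    by_cases hh : h' = h
    · have : detect_passes_runStep (rs ++ [(a, b, h)]) (f, h') =
          rs ++ [(a, f, h')] := by
        simp [detect_passes_runStep, hh]
      rw [List.foldl_cons, this, ih, hh]
      simp [pvRunsCont]
    · have hne : h ≠ h' := fun hc => hh hc.symm
      have : detect_passes_runStep (rs ++ [(a, b, h)]) (f, h') =
          (rs ++ [(a, b, h)]) ++ [(f, f, h')] := by
        simp [detect_passes_runStep, hne]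
      rw [List.foldl_cons, this, ih]
      simp [pvRunsCont, hh]

-- rendering a dict insert at a nonnegative key is a List.set on the rendered list
lemma render_insert (n : Nat) (d : PySem.Dict Int Int) (k v : Int) (hk : 0 ≤ k) :
    (List.range n).map (fun i : Nat => (d.insert k v).getD (i : Int) (-1)) =
      ((List.range n).map (fun i : Nat => d.getD (i : Int) (-1))).set k.toNat v := by
  apply List.ext_getElem
  · simp
  · intro i hi hi'
    simp only [List.getElem_map, List.getElem_range, List.getElem_set,
      PySem.Dict.getD_insert]
    by_cases hik : (i : Int) = k
    · have h1 : k.toNat = i := by omega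
      simp [hik, h1]
    · have h1 : ¬ (k.toNat = i) := by omega
      simp [hik, h1]

-- the set-fold over run pairs renders the dict-fold, provided every cf is nonnegative
lemma setFold_eq_render (pa : List (List (Int × Int))) (n : Nat) :
    ∀ (prs : List ((Int × Int × Int) × (Int × Int × Int))) (d : PySem.Dict Int Int),
      (∀ pr ∈ prs, 0 ≤ pr.2.1) →
      prs.foldl (pvSetStep pa) ((List.range n).map (fun i : Nat => d.getD (i : Int) (-1))) =
        (List.range n).map
          (fun i : Nat => (prs.foldl (detect_passes_hitStep pa) d).getD (i : Int) (-1)) := by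
  intro prs
  induction prs with
  | nil => intro d _; rfl
  | cons pr rest ih =>
    intro d hpos
    obtain ⟨⟨ra, pf, ph⟩, cf, cb, ch⟩ := pr
    have hcf : 0 ≤ cf := hpos ((ra, pf, ph), cf, cb, ch) (by simp)
    have hrest : ∀ pr ∈ rest, 0 ≤ pr.2.1 := fun p hp => hpos p (by simp [hp])
    have hstep : pvSetStep pa ((List.range n).map (fun i : Nat => d.getD (i : Int) (-1)))
        ((ra, pf, ph), cf, cb, ch) =
        (List.range n).map (fun i : Nat =>
          (detect_passes_hitStep pa d ((ra, pf, ph), cf, cb, ch)).getD (i : Int) (-1)) := by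
      simp only [pvSetStep, detect_passes_hitStep]
      split_ifs with hA hB
      · rw [render_insert n d cf _ hcf]
      · rfl
      · rfl
    rw [List.foldl_cons, List.foldl_cons, hstep, ih _ hrest]

-- event frames are ≥ the starting counter
lemma events_frames_nonneg (ba : List Int) :
    ∀ (s : Int), 0 ≤ s → ∀ e ∈ detect_passes_events s ba, 0 ≤ e.1 := by
  induction ba with
  | nil => intro s _ e he; simp [detect_passes_events] at he
  | cons h rest ih =>
    intro s hs e he
    by_cases hh : h = -1
    · exact ih (s + 1) (by omega) e (by simpa [detect_passes_events, hh] using he)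
    · simp only [detect_passes_events, hh, ne_eq, not_false_eq_true, if_true,
        List.mem_cons] at he
      rcases he with he | he
      · subst he; simpa using hs
      · exact ih (s + 1) (by omega) e he

-- run first frames are nonnegative when the pending run's and all events' are
lemma runsCont_first_nonneg :
    ∀ (evs : List (Int × Int)) (cur : Int × Int × Int),
      0 ≤ cur.1 → (∀ e ∈ evs, 0 ≤ e.1) →
      ∀ r ∈ pvRunsCont cur evs, 0 ≤ r.1 := by
  intro evs
  induction evs with
  | nil =>
    intro cur hc _ r hr
    obtain ⟨a, b, h⟩ := cur
    simp only [pvRunsCont, List.mem_singleton] at hr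
    subst hr; exact hc
  | cons e rest ih =>
    intro cur hc he r hr
    obtain ⟨a, b, h⟩ := cur
    obtain ⟨f, h'⟩ := e
    have hf : 0 ≤ f := he (f, h') (by simp)
    have he' : ∀ x ∈ rest, 0 ≤ x.1 := fun x hx => he x (by simp [hx])
    by_cases hh : h' = h
    · exact ih (a, f, h) hc he' r (by simpa [pvRunsCont, hh] using hr)
    · simp only [pvRunsCont, hh, if_false, List.mem_cons] at hr
      rcases hr with hr | hr
      · subst hr; exact hc
      · exact ih (f, f, h') hf he' r hr

-- second components of zip l l.tail lie in l
lemma zip_tail_snd_mem {α : Type} (l : List α) :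
    ∀ p ∈ l.zip l.tail, p.2 ∈ l := by
  intro p hp
  have := List.of_mem_zip hp
  exact List.mem_of_mem_tail this.2

theorem detect_passes_spec : Claim_equal_detect_passes := by
  intro ba pa _
  unfold Spec_detect_passes detect_passes_alt
  rw [detect_passes_eq_pairFold]
  have hbase : List.replicate ba.length (-1 : Int) =
      (List.range ba.length).map
        (fun i : Nat => (PySem.Dict.mk ([] : List (Int × Int))).getD (i : Int) (-1)) := by
    apply List.ext_getElem <;> simp [PySem.Dict.getD, PySem.Dict.get?]
  cases hev : detect_passes_events 0 ba with
  | nil => simpa using hbase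
  | cons e rest =>
    obtain ⟨f, h⟩ := e
    have hfold := foldl_runStep_eq rest [] (f, f, h)
    have hrun : detect_passes_runStep [] (f, h) = [(f, f, h)] := by
      simp [detect_passes_runStep]
    have hruns : ((f, h) :: rest).foldl detect_passes_runStep [] =
        pvRunsCont (f, f, h) rest := by
      rw [List.foldl_cons, hrun]
      simpa using hfold
    have hfr : ∀ e' ∈ detect_passes_events 0 ba, 0 ≤ e'.1 :=
      events_frames_nonneg ba 0 le_rfl
    have hf0 : 0 ≤ f := by
      have := hfr (f, h) (by rw [hev]; simp)
      simpa using this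
    have hrest : ∀ e' ∈ rest, 0 ≤ e'.1 := by
      intro e' he'
      exact hfr e' (by rw [hev]; simp [he'])
    have hrs : ∀ r ∈ pvRunsCont (f, f, h) rest, 0 ≤ r.1 :=
      runsCont_first_nonneg rest (f, f, h) hf0 hrest
    have hpos : ∀ pr ∈ (pvRunsCont (f, f, h) rest).zip (pvRunsCont (f, f, h) rest).tail,
        0 ≤ pr.2.1 := fun pr hpr => hrs pr.2 (zip_tail_snd_mem _ pr hpr)
    simp only [List.tail_cons, hruns]
    rw [hbase, pairFold_eq_runFold pa rest f f h,
      setFold_eq_render pa ba.length _ _ hpos]
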